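-- pv_equiv track=rewrite | github.com/AbazarAdam/CyberGuardX | backend/app/services/breach_checker.py | _create_data_exposure_summary
-- ===== SOURCE A (Python) =====
-- from typing import Dict, List, Optional
--
-- def _create_data_exposure_summary(breaches: List[Dict]) -> Dict:
--     """Create summary of data exposure types."""
--     exposure = {
--         "email_addresses": False,
--         "passwords": False,
--         "usernames": False,
--         "password_hints": False,
--         "phone_numbers": False,
--         "physical_addresses": False,
--         "credit_cards": False,
--         "social_security_numbers": False,
--         "dates_of_birth": False
--     }
--
--     for breach in breaches:
--         for data_class in breach.get("data_classes", []):
--             dc_lower = data_class.lower()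
--             if "email" in dc_lower:
--                 exposure["email_addresses"] = True
--             if "password" in dc_lower and "hint" not in dc_lower:
--                 exposure["passwords"] = True
--             if "username" in dc_lower:
--                 exposure["usernames"] = True
--             if "hint" in dc_lower:
--                 exposure["password_hints"] = True
--             if "phone" in dc_lower:
--                 exposure["phone_numbers"] = True
--             if "address" in dc_lower and "email" not in dc_lower:
--                 exposure["physical_addresses"] = True
--             if "credit" in dc_lower or "card" in dc_lower:
--                 exposure["credit_cards"] = True
--             if "social security" in dc_lower or "ssn" in dc_lower:
--                 exposure["social_security_numbers"] = True
--             if "birth" in dc_lower or "dob" in dc_lower: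
--                 exposure["dates_of_birth"] = True
--
--     return exposure
-- ===== SOURCE B (Python) =====
-- def _create_data_exposure_summary(breaches):
--     """Create summary of data exposure types."""
--     all_dc = [dc.lower() for breach in breaches for dc in breach.get("data_classes", [])]
--     return {
--         "email_addresses": any("email" in d for d in all_dc),
--         "passwords": any("password" in d and "hint" not in d for d in all_dc),
--         "usernames": any("username" in d for d in all_dc),
--         "password_hints": any("hint" in d for d in all_dc),
--         "phone_numbers": any("phone" in d for d in all_dc),
--         "physical_addresses": any("address" in d and "email" not in d for d in all_dc),
--         "credit_cards": any("credit" in d or "card" in d for d in all_dc),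
--         "social_security_numbers": any("social security" in d or "ssn" in d for d in all_dc),
--         "dates_of_birth": any("birth" in d or "dob" in d for d in all_dc),
--     }
-- ===== Notes on version B (the rewrite author's own statement) =====
-- stated objective: simpler
-- what changed: A makes one accumulating pass mutating a 9-key dict per data class; B first flattens all breaches' data classes into one lowercased list and then computes each of the nine flags independently with any() over that list.
import Mathlib
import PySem

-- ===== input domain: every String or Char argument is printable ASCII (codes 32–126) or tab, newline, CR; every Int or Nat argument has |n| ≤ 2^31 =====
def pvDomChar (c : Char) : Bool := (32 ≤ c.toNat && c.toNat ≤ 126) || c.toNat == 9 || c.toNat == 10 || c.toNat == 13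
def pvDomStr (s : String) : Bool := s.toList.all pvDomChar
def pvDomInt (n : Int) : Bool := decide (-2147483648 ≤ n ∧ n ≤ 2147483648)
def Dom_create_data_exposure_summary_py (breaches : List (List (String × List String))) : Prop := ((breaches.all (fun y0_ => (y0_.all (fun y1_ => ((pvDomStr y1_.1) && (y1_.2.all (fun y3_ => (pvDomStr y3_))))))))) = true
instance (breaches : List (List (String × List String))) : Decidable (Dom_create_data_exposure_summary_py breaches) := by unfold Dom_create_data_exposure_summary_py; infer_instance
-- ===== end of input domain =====

-- B flattens all lowercased data classes once and computes each exposure flag with an independent any-scan,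
-- instead of A's single accumulating pass that mutates a dict per data class (objective: simpler).


-- ===== PORT A =====
-- one iteration of A's inner loop: lower the data class and run the nine if-updates on the dict
def pvStepA (exposure : PySem.Dict String Bool) (data_class : String) : PySem.Dict String Bool :=
  let dc_lower := PySem.Str.lower data_class
  let e := exposure
  let e := if PySem.Str.isIn "email" dc_lower then e.insert "email_addresses" true else e
  let e := if PySem.Str.isIn "password" dc_lower && !PySem.Str.isIn "hint" dc_lower then e.insert "passwords" true else e
  let e := if PySem.Str.isIn "username" dc_lower then e.insert "usernames" true else e
  let e := if PySem.Str.isIn "hint" dc_lower then e.insert "password_hints" true else e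
  let e := if PySem.Str.isIn "phone" dc_lower then e.insert "phone_numbers" true else e
  let e := if PySem.Str.isIn "address" dc_lower && !PySem.Str.isIn "email" dc_lower then e.insert "physical_addresses" true else e
  let e := if PySem.Str.isIn "credit" dc_lower || PySem.Str.isIn "card" dc_lower then e.insert "credit_cards" true else e
  let e := if PySem.Str.isIn "social security" dc_lower || PySem.Str.isIn "ssn" dc_lower then e.insert "social_security_numbers" true else e
  let e := if PySem.Str.isIn "birth" dc_lower || PySem.Str.isIn "dob" dc_lower then e.insert "dates_of_birth" true else e
  e

def create_data_exposure_summary_py (breaches : List (List (String × List String))) : List (String × Bool) :=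
  let exposure : PySem.Dict String Bool := PySem.Dict.mk
    [("email_addresses", false), ("passwords", false), ("usernames", false),
     ("password_hints", false), ("phone_numbers", false), ("physical_addresses", false),
     ("credit_cards", false), ("social_security_numbers", false), ("dates_of_birth", false)]
  (breaches.foldl
    (fun e breach => ((PySem.Dict.mk breach).getD "data_classes" []).foldl pvStepA e)
    exposure).items

-- ===== PORT B =====
def create_data_exposure_summary_py_alt (breaches : List (List (String × List String))) : List (String × Bool) :=
  let all_dc : List String :=
    breaches.flatMap (fun breach => ((PySem.Dict.mk breach).getD "data_classes" []).map PySem.Str.lower)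
  [("email_addresses", all_dc.any (fun d => PySem.Str.isIn "email" d)),
   ("passwords", all_dc.any (fun d => PySem.Str.isIn "password" d && !PySem.Str.isIn "hint" d)),
   ("usernames", all_dc.any (fun d => PySem.Str.isIn "username" d)),
   ("password_hints", all_dc.any (fun d => PySem.Str.isIn "hint" d)),
   ("phone_numbers", all_dc.any (fun d => PySem.Str.isIn "phone" d)),
   ("physical_addresses", all_dc.any (fun d => PySem.Str.isIn "address" d && !PySem.Str.isIn "email" d)),
   ("credit_cards", all_dc.any (fun d => PySem.Str.isIn "credit" d || PySem.Str.isIn "card" d)),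
   ("social_security_numbers", all_dc.any (fun d => PySem.Str.isIn "social security" d || PySem.Str.isIn "ssn" d)),
   ("dates_of_birth", all_dc.any (fun d => PySem.Str.isIn "birth" d || PySem.Str.isIn "dob" d))]

-- ===== PRECONDITION & SPEC =====
def Spec_create_data_exposure_summary_py (breaches : List (List (String × List String))) (out : List (String × Bool)) : Prop := out = create_data_exposure_summary_py_alt breaches
instance (breaches : List (List (String × List String))) (out : List (String × Bool)) : Decidable (Spec_create_data_exposure_summary_py breaches out) := by unfold Spec_create_data_exposure_summary_py; infer_instance

-- ===== CLAIM (what is proved, stated in full; the proofs are below) =====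
def Claim_equal_create_data_exposure_summary_py : Prop := ∀ (breaches : List (List (String × List String))), Dom_create_data_exposure_summary_py breaches → Spec_create_data_exposure_summary_py breaches (create_data_exposure_summary_py breaches)

-- ===== LEMMAS AND PROOFS =====
-- the shape of A's accumulator: the nine fixed keys with nine Boolean slots
def pvMk9 (b1 b2 b3 b4 b5 b6 b7 b8 b9 : Bool) : PySem.Dict String Bool :=
  PySem.Dict.mk
    [("email_addresses", b1), ("passwords", b2), ("usernames", b3),
     ("password_hints", b4), ("phone_numbers", b5), ("physical_addresses", b6),
     ("credit_cards", b7), ("social_security_numbers", b8), ("dates_of_birth", b9)]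

theorem pvIns1 (b1 b2 b3 b4 b5 b6 b7 b8 b9 : Bool) : (pvMk9 b1 b2 b3 b4 b5 b6 b7 b8 b9).insert "email_addresses" true = pvMk9 true b2 b3 b4 b5 b6 b7 b8 b9 := rfl
theorem pvIns2 (b1 b2 b3 b4 b5 b6 b7 b8 b9 : Bool) : (pvMk9 b1 b2 b3 b4 b5 b6 b7 b8 b9).insert "passwords" true = pvMk9 b1 true b3 b4 b5 b6 b7 b8 b9 := rfl
theorem pvIns3 (b1 b2 b3 b4 b5 b6 b7 b8 b9 : Bool) : (pvMk9 b1 b2 b3 b4 b5 b6 b7 b8 b9).insert "usernames" true = pvMk9 b1 b2 true b4 b5 b6 b7 b8 b9 := rfl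
theorem pvIns4 (b1 b2 b3 b4 b5 b6 b7 b8 b9 : Bool) : (pvMk9 b1 b2 b3 b4 b5 b6 b7 b8 b9).insert "password_hints" true = pvMk9 b1 b2 b3 true b5 b6 b7 b8 b9 := rfl
theorem pvIns5 (b1 b2 b3 b4 b5 b6 b7 b8 b9 : Bool) : (pvMk9 b1 b2 b3 b4 b5 b6 b7 b8 b9).insert "phone_numbers" true = pvMk9 b1 b2 b3 b4 true b6 b7 b8 b9 := rfl
theorem pvIns6 (b1 b2 b3 b4 b5 b6 b7 b8 b9 : Bool) : (pvMk9 b1 b2 b3 b4 b5 b6 b7 b8 b9).insert "physical_addresses" true = pvMk9 b1 b2 b3 b4 b5 true b7 b8 b9 := rfl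
theorem pvIns7 (b1 b2 b3 b4 b5 b6 b7 b8 b9 : Bool) : (pvMk9 b1 b2 b3 b4 b5 b6 b7 b8 b9).insert "credit_cards" true = pvMk9 b1 b2 b3 b4 b5 b6 true b8 b9 := rfl
theorem pvIns8 (b1 b2 b3 b4 b5 b6 b7 b8 b9 : Bool) : (pvMk9 b1 b2 b3 b4 b5 b6 b7 b8 b9).insert "social_security_numbers" true = pvMk9 b1 b2 b3 b4 b5 b6 b7 true b9 := rfl
theorem pvIns9 (b1 b2 b3 b4 b5 b6 b7 b8 b9 : Bool) : (pvMk9 b1 b2 b3 b4 b5 b6 b7 b8 b9).insert "dates_of_birth" true = pvMk9 b1 b2 b3 b4 b5 b6 b7 b8 true := rfl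

theorem pvUpd1 (b1 b2 b3 b4 b5 b6 b7 b8 b9 c : Bool) : (if c = true then (pvMk9 b1 b2 b3 b4 b5 b6 b7 b8 b9).insert "email_addresses" true else pvMk9 b1 b2 b3 b4 b5 b6 b7 b8 b9) = pvMk9 (b1 || c) b2 b3 b4 b5 b6 b7 b8 b9 := by cases c <;> simp [pvIns1]
theorem pvUpd2 (b1 b2 b3 b4 b5 b6 b7 b8 b9 c : Bool) : (if c = true then (pvMk9 b1 b2 b3 b4 b5 b6 b7 b8 b9).insert "passwords" true else pvMk9 b1 b2 b3 b4 b5 b6 b7 b8 b9) = pvMk9 b1 (b2 || c) b3 b4 b5 b6 b7 b8 b9 := by cases c <;> simp [pvIns2]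
theorem pvUpd3 (b1 b2 b3 b4 b5 b6 b7 b8 b9 c : Bool) : (if c = true then (pvMk9 b1 b2 b3 b4 b5 b6 b7 b8 b9).insert "usernames" true else pvMk9 b1 b2 b3 b4 b5 b6 b7 b8 b9) = pvMk9 b1 b2 (b3 || c) b4 b5 b6 b7 b8 b9 := by cases c <;> simp [pvIns3]
theorem pvUpd4 (b1 b2 b3 b4 b5 b6 b7 b8 b9 c : Bool) : (if c = true then (pvMk9 b1 b2 b3 b4 b5 b6 b7 b8 b9).insert "password_hints" true else pvMk9 b1 b2 b3 b4 b5 b6 b7 b8 b9) = pvMk9 b1 b2 b3 (b4 || c) b5 b6 b7 b8 b9 := by cases c <;> simp [pvIns4]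
theorem pvUpd5 (b1 b2 b3 b4 b5 b6 b7 b8 b9 c : Bool) : (if c = true then (pvMk9 b1 b2 b3 b4 b5 b6 b7 b8 b9).insert "phone_numbers" true else pvMk9 b1 b2 b3 b4 b5 b6 b7 b8 b9) = pvMk9 b1 b2 b3 b4 (b5 || c) b6 b7 b8 b9 := by cases c <;> simp [pvIns5]
theorem pvUpd6 (b1 b2 b3 b4 b5 b6 b7 b8 b9 c : Bool) : (if c = true then (pvMk9 b1 b2 b3 b4 b5 b6 b7 b8 b9).insert "physical_addresses" true else pvMk9 b1 b2 b3 b4 b5 b6 b7 b8 b9) = pvMk9 b1 b2 b3 b4 b5 (b6 || c) b7 b8 b9 := by cases c <;> simp [pvIns6]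
theorem pvUpd7 (b1 b2 b3 b4 b5 b6 b7 b8 b9 c : Bool) : (if c = true then (pvMk9 b1 b2 b3 b4 b5 b6 b7 b8 b9).insert "credit_cards" true else pvMk9 b1 b2 b3 b4 b5 b6 b7 b8 b9) = pvMk9 b1 b2 b3 b4 b5 b6 (b7 || c) b8 b9 := by cases c <;> simp [pvIns7]
theorem pvUpd8 (b1 b2 b3 b4 b5 b6 b7 b8 b9 c : Bool) : (if c = true then (pvMk9 b1 b2 b3 b4 b5 b6 b7 b8 b9).insert "social_security_numbers" true else pvMk9 b1 b2 b3 b4 b5 b6 b7 b8 b9) = pvMk9 b1 b2 b3 b4 b5 b6 b7 (b8 || c) b9 := by cases c <;> simp [pvIns8]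
theorem pvUpd9 (b1 b2 b3 b4 b5 b6 b7 b8 b9 c : Bool) : (if c = true then (pvMk9 b1 b2 b3 b4 b5 b6 b7 b8 b9).insert "dates_of_birth" true else pvMk9 b1 b2 b3 b4 b5 b6 b7 b8 b9) = pvMk9 b1 b2 b3 b4 b5 b6 b7 b8 (b9 || c) := by cases c <;> simp [pvIns9]

theorem pvStepA_mk9 (b1 b2 b3 b4 b5 b6 b7 b8 b9 : Bool) (s : String) :
    pvStepA (pvMk9 b1 b2 b3 b4 b5 b6 b7 b8 b9) s =
    pvMk9 (b1 || PySem.Str.isIn "email" (PySem.Str.lower s))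
          (b2 || (PySem.Str.isIn "password" (PySem.Str.lower s) && !PySem.Str.isIn "hint" (PySem.Str.lower s)))
          (b3 || PySem.Str.isIn "username" (PySem.Str.lower s))
          (b4 || PySem.Str.isIn "hint" (PySem.Str.lower s))
          (b5 || PySem.Str.isIn "phone" (PySem.Str.lower s))
          (b6 || (PySem.Str.isIn "address" (PySem.Str.lower s) && !PySem.Str.isIn "email" (PySem.Str.lower s)))
          (b7 || (PySem.Str.isIn "credit" (PySem.Str.lower s) || PySem.Str.isIn "card" (PySem.Str.lower s)))
          (b8 || (PySem.Str.isIn "social security" (PySem.Str.lower s) || PySem.Str.isIn "ssn" (PySem.Str.lower s)))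
          (b9 || (PySem.Str.isIn "birth" (PySem.Str.lower s) || PySem.Str.isIn "dob" (PySem.Str.lower s))) := by
  simp only [pvStepA, pvUpd1, pvUpd2, pvUpd3, pvUpd4, pvUpd5, pvUpd6, pvUpd7, pvUpd8, pvUpd9]

theorem pvNest (breaches : List (List (String × List String))) (d : PySem.Dict String Bool) :
    List.foldl (fun e breach => ((PySem.Dict.mk breach).getD "data_classes" []).foldl pvStepA e) d breaches =
    List.foldl pvStepA d (breaches.flatMap (fun breach => (PySem.Dict.mk breach).getD "data_classes" [])) := by
  induction breaches generalizing d with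
  | nil => rfl
  | cons x xs ih => simp [ih]

theorem pvFoldA_mk9 (l : List String) (b1 b2 b3 b4 b5 b6 b7 b8 b9 : Bool) :
    l.foldl pvStepA (pvMk9 b1 b2 b3 b4 b5 b6 b7 b8 b9) =
    pvMk9 (b1 || l.any (fun s => PySem.Str.isIn "email" (PySem.Str.lower s)))
          (b2 || l.any (fun s => PySem.Str.isIn "password" (PySem.Str.lower s) && !PySem.Str.isIn "hint" (PySem.Str.lower s)))
          (b3 || l.any (fun s => PySem.Str.isIn "username" (PySem.Str.lower s)))
          (b4 || l.any (fun s => PySem.Str.isIn "hint" (PySem.Str.lower s)))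
          (b5 || l.any (fun s => PySem.Str.isIn "phone" (PySem.Str.lower s)))
          (b6 || l.any (fun s => PySem.Str.isIn "address" (PySem.Str.lower s) && !PySem.Str.isIn "email" (PySem.Str.lower s)))
          (b7 || l.any (fun s => PySem.Str.isIn "credit" (PySem.Str.lower s) || PySem.Str.isIn "card" (PySem.Str.lower s)))
          (b8 || l.any (fun s => PySem.Str.isIn "social security" (PySem.Str.lower s) || PySem.Str.isIn "ssn" (PySem.Str.lower s)))
          (b9 || l.any (fun s => PySem.Str.isIn "birth" (PySem.Str.lower s) || PySem.Str.isIn "dob" (PySem.Str.lower s))) := by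
  induction l generalizing b1 b2 b3 b4 b5 b6 b7 b8 b9 with
  | nil => simp
  | cons x xs ih =>
    simp only [List.foldl_cons, pvStepA_mk9, ih, List.any_cons, Bool.or_assoc]

-- ===== VERDICT (by name: the statement is the Claim_ definition above) =====
theorem create_data_exposure_summary_py_spec : Claim_equal_create_data_exposure_summary_py := by
  intro breaches _
  unfold Spec_create_data_exposure_summary_py
  simp only [create_data_exposure_summary_py, create_data_exposure_summary_py_alt]
  rw [show (PySem.Dict.mk
    [("email_addresses", false), ("passwords", false), ("usernames", false),
     ("password_hints", false), ("phone_numbers", false), ("physical_addresses", false),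
     ("credit_cards", false), ("social_security_numbers", false), ("dates_of_birth", false)] : PySem.Dict String Bool) = pvMk9 false false false false false false false false false from rfl]
  rw [pvNest, pvFoldA_mk9]
  simp [pvMk9, List.any_map, Function.comp_def, PySem.Str.toList_lower]
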